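-- pv_equiv track=rewrite | github.com/hyemin21/PPS | 2024_summer/week4/A048_신혜민_20240724.py | problem_1316
-- ===== SOURCE A (Python) =====
-- def problem_1316(words):
--     def is_group_word(word):
--         seen = set()
--         prev_char = ""
--         for char in word:
--             if char != prev_char:
--                 if char in seen:
--                     return False
--                 seen.add(char)
--                 prev_char = char
--         return True
--
--     return sum(1 for word in words if is_group_word(word))
-- ===== SOURCE B (Python) =====
-- def problem_1316(words):
--     def is_group_word(word):
--         # group word <=> every letter's occurrences form one contiguous block:
--         # the count(c) characters starting at the first occurrence of c are all c
--         return all(word[word.index(c): word.index(c) + word.count(c)] == c * word.count(c)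
--                    for c in set(word))
--
--     return sum(1 for word in words if is_group_word(word))
-- ===== Notes on version B (the rewrite author's own statement) =====
-- stated objective: alternative
-- what changed: B drops A's stateful left-to-right scan (seen-set + previous-char) and instead decides group-word-ness by a per-letter occurrence-span test: for each distinct letter c, the count(c) characters starting at the first occurrence of c must all be c, i.e. every letter's occurrences form one contiguous block.
import Mathlib
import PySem

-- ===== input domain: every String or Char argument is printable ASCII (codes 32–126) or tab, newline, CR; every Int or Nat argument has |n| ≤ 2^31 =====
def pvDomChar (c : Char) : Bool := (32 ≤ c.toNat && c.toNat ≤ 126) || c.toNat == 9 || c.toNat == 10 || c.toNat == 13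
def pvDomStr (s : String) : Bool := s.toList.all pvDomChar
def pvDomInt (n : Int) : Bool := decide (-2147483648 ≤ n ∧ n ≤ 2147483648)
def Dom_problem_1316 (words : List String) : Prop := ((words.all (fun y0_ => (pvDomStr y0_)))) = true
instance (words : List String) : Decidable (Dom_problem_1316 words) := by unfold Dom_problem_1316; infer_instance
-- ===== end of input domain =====

-- B replaces A's stateful seen-set/prev-char scan by a per-letter occurrence-span
-- test: for each distinct letter c, the count(c) characters from its first
-- occurrence must all be c (alternative algorithm, similar cost).

-- ===== PORT A =====
-- is_group_word's loop: state is (seen, prev_char); prev_char = "" is ported as none.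
def pvIsGroupA : List Char → PySem.Set Char → Option Char → Bool
  | [], _, _ => true
  | c :: rest, seen, prev =>
    if some c ≠ prev then
      if PySem.Set.contains seen c then false
      else pvIsGroupA rest (PySem.Set.add seen c) (some c)
    else pvIsGroupA rest seen prev

def problem_1316 (words : List String) : Int :=
  words.foldl (fun acc w => if pvIsGroupA w.toList PySem.Set.empty none then acc + 1 else acc) 0

-- ===== PORT B =====
-- word.index(c): c is drawn from set(word), so it is always present; the getD 0
-- default is never used (index? is some exactly when c ∈ word).
def pvCondB (w : List Char) (c : Char) : Bool :=
  let i : Nat := (PySem.List.index? w c).getD 0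
  let n : Nat := PySem.List.count w c
  PySem.List.slice w (some (i : Int)) (some ((i : Int) + (n : Int))) == PySem.List.pyRepeat [c] (n : Int)

def pvIsGroupB (w : List Char) : Bool :=
  (PySem.Set.ofList w).all (fun c => pvCondB w c)

def problem_1316_alt (words : List String) : Int :=
  words.foldl (fun acc w => if pvIsGroupB w.toList then acc + 1 else acc) 0

-- ===== PRECONDITION & SPEC =====
def Spec_problem_1316 (words : List String) (out : Int) : Prop := out = problem_1316_alt words
instance (words : List String) (out : Int) : Decidable (Spec_problem_1316 words out) := by unfold Spec_problem_1316; infer_instance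

-- ===== CLAIM (what is proved, stated in full; the proofs are below) =====
def Claim_equal_problem_1316 : Prop := ∀ (words : List String), Dom_problem_1316 words → Spec_problem_1316 words (problem_1316 words)

-- ===== LEMMAS AND PROOFS =====

-- the run keys of cs, given the previous key (characterises A's scan)
def pvCollapse : Option Char → List Char → List Char
  | _, [] => []
  | prev, c :: rest => if some c = prev then pvCollapse prev rest else c :: pvCollapse (some c) rest

-- "the occurrences of c in cs form one contiguous block starting at idxOf c"
def pvContig (cs : List Char) (c : Char) : Prop :=
  (cs.drop (cs.idxOf c)).take (cs.count c) = List.replicate (cs.count c) c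

lemma isGroupA_iff (cs : List Char) (seen : PySem.Set Char) (prev : Option Char) :
    pvIsGroupA cs seen prev = true ↔
      (pvCollapse prev cs).Nodup ∧ ∀ c ∈ pvCollapse prev cs, ¬ c ∈ seen := by
  induction cs generalizing seen prev with
  | nil => simp [pvIsGroupA, pvCollapse]
  | cons c rest ih =>
    by_cases h : some c = prev
    · simp only [pvIsGroupA, pvCollapse, if_pos h, if_neg (by simp [h] : ¬ some c ≠ prev)]
      exact ih seen prev
    · simp only [pvIsGroupA, pvCollapse, if_neg h, if_pos (by simpa using h : some c ≠ prev)]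
      by_cases hc : PySem.Set.contains seen c
      · rw [if_pos hc]
        have hcs : c ∈ seen := (PySem.Set.contains_iff seen c).mp hc
        simp only [List.nodup_cons, List.mem_cons]
        constructor
        · intro hfalse; cases hfalse
        · rintro ⟨_, hall⟩
          exact absurd hcs (hall c (Or.inl rfl))
      · have hcn : ¬ c ∈ seen := fun hx => hc ((PySem.Set.contains_iff seen c).mpr hx)
        rw [if_neg hc, ih]
        simp only [List.nodup_cons, List.mem_cons, PySem.Set.mem_add]
        constructor
        · rintro ⟨hnd, hall⟩
          refine ⟨⟨fun hmem => (hall c hmem) (Or.inr rfl), hnd⟩, ?_⟩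
          rintro x (rfl | hx')
          · exact hcn
          · exact fun hxs => (hall x hx') (Or.inl hxs)
        · rintro ⟨⟨hcl, hnd⟩, hall⟩
          refine ⟨hnd, fun x hx => ?_⟩
          rintro (hxs | rfl)
          · exact hall x (Or.inr hx) hxs
          · exact hcl hx

lemma collapse_some_of_head_ne (c : Char) (t : List Char) (h : t.head? ≠ some c) :
    pvCollapse (some c) t = pvCollapse none t := by
  cases t with
  | nil => rfl
  | cons d t' =>
    have hdc : ¬ d = c := by simpa using h
    simp [pvCollapse, hdc]

lemma mem_collapse_of_mem (d : Char) : ∀ (prev : Option Char) (cs : List Char),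
    prev ≠ some d → d ∈ cs → d ∈ pvCollapse prev cs := by
  intro prev cs
  induction cs generalizing prev with
  | nil => intro _ h; cases h
  | cons a t ih =>
    intro hprev hmem
    by_cases ha : some a = prev
    · have had : a ≠ d := by rintro rfl; exact hprev ha.symm
      have hdt : d ∈ t := by
        cases List.mem_cons.mp hmem with
        | inl hh => exact absurd hh.symm had
        | inr hh => exact hh
      simp only [pvCollapse, if_pos ha]
      exact ih prev hprev hdt
    · simp only [pvCollapse, if_neg ha, List.mem_cons]
      by_cases hda : d = a
      · exact Or.inl hda
      · cases List.mem_cons.mp hmem with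
        | inl hh => exact absurd hh hda
        | inr hh =>
          exact Or.inr (ih (some a) (by simpa using fun hx : a = d => hda hx.symm) hh)

lemma collapse_subset (prev : Option Char) (cs : List Char) : pvCollapse prev cs ⊆ cs := by
  induction cs generalizing prev with
  | nil => simp [pvCollapse]
  | cons a t ih =>
    by_cases ha : some a = prev
    · simp only [pvCollapse, if_pos ha]
      exact List.Subset.trans (ih prev) (List.subset_cons_self a t)
    · simp only [pvCollapse, if_neg ha]
      exact List.cons_subset_cons a (ih (some a))

lemma mem_collapse_none (d : Char) (cs : List Char) :
    d ∈ pvCollapse none cs ↔ d ∈ cs := by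
  constructor
  · exact fun h => collapse_subset none cs h
  · exact mem_collapse_of_mem d none cs (by simp)

-- shift: the contiguity test for d ≠ c is unchanged by a prepended c
lemma contig_cons_ne (c d : Char) (t : List Char) (hd : d ≠ c) :
    pvContig (c :: t) d ↔ pvContig t d := by
  unfold pvContig
  rw [List.idxOf_cons_ne t (fun h => hd h.symm)]
  have hcnt : (c :: t).count d = t.count d := by simp [Ne.symm hd]
  rw [hcnt, List.drop_succ_cons]

lemma contig_cons_cons_self (c : Char) (t' : List Char) :
    pvContig (c :: c :: t') c ↔ pvContig (c :: t') c := by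
  unfold pvContig
  rw [List.idxOf_cons_self, List.idxOf_cons_self, List.count_cons_self, List.drop_zero, List.drop_zero]
  rw [List.take_succ_cons, List.replicate_succ]
  simp

lemma contig_cons_head_ne (c : Char) (t : List Char) (h : t.head? ≠ some c) :
    pvContig (c :: t) c ↔ c ∉ t := by
  unfold pvContig
  rw [List.idxOf_cons_self, List.drop_zero, List.count_cons_self, List.take_succ_cons,
    List.replicate_succ]
  constructor
  · intro heq hc
    have hcnt : 1 ≤ t.count c := List.one_le_count_iff.mpr hc
    have h1 : (t.take (t.count c)).head? = (List.replicate (t.count c) c).head? := by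
      rw [(List.cons.inj heq).2]
    rw [List.head?_take, List.head?_replicate] at h1
    have hpos : t.count c ≠ 0 := by omega
    simp only [if_neg hpos] at h1
    exact h (by
      cases t with
      | nil => simp at hc
      | cons a t'' => simpa using h1)
  · intro hc
    rw [List.count_eq_zero_of_not_mem hc]
    simp

-- the crux: per-letter contiguity ⇔ the run keys are distinct
lemma contig_iff_collapse_nodup (cs : List Char) :
    (∀ d ∈ cs, pvContig cs d) ↔ (pvCollapse none cs).Nodup := by
  induction cs with
  | nil => simp [pvCollapse]
  | cons c t ih =>
    by_cases h : t.head? = some c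
    · obtain ⟨t', rfl⟩ : ∃ t', t = c :: t' := by
        cases t with
        | nil => simp at h
        | cons a t' => exact ⟨t', by simp_all⟩
      have hcol : pvCollapse none (c :: c :: t') = pvCollapse none (c :: t') := by
        simp [pvCollapse]
      rw [hcol, ← ih]
      constructor
      · intro H d hd
        by_cases hdc : d = c
        · subst hdc
          exact (contig_cons_cons_self d t').mp (H d (List.mem_cons_self))
        · exact (contig_cons_ne c d (c :: t') hdc).mp (H d (List.mem_cons_of_mem c hd))
      · intro H d hd
        have hd' : d ∈ c :: t' := by
          cases List.mem_cons.mp hd with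
          | inl hh => exact hh ▸ List.mem_cons_self
          | inr hh => exact hh
        by_cases hdc : d = c
        · subst hdc
          exact (contig_cons_cons_self d t').mpr (H d List.mem_cons_self)
        · exact (contig_cons_ne c d (c :: t') hdc).mpr (H d hd')
    · have hcol : pvCollapse none (c :: t) = c :: pvCollapse none t := by
        simp only [pvCollapse, if_neg (by simp : ¬ some c = none)]
        rw [collapse_some_of_head_ne c t h]
      rw [hcol, List.nodup_cons, mem_collapse_none, ← ih]
      constructor
      · intro H
        have hcnot : c ∉ t := (contig_cons_head_ne c t h).mp (H c List.mem_cons_self)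
        refine ⟨hcnot, fun d hd => ?_⟩
        have hdc : d ≠ c := fun e => hcnot (e ▸ hd)
        exact (contig_cons_ne c d t hdc).mp (H d (List.mem_cons_of_mem c hd))
      · rintro ⟨hcnot, H⟩ d hd
        cases List.mem_cons.mp hd with
        | inl hh =>
          subst hh
          exact (contig_cons_head_ne d t h).mpr hcnot
        | inr hdt =>
          have hdc : d ≠ c := fun e => hcnot (e ▸ hdt)
          exact (contig_cons_ne c d t hdc).mpr (H d hdt)

lemma index?_getD_eq_idxOf (w : List Char) (c : Char) (hc : c ∈ w) :
    (PySem.List.index? w c).getD 0 = w.idxOf c := by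
  have hs : (PySem.List.index? w c).isSome := (PySem.List.index?_isSome_iff w c).mpr hc
  rw [PySem.List.index?_eq_idxOf?] at *
  rw [List.idxOf_eq_getD_idxOf? c w]
  cases hso : w.idxOf? c with
  | none => rw [hso] at hs; simp at hs
  | some k => simp

lemma condB_iff (w : List Char) (c : Char) (hc : c ∈ w) :
    pvCondB w c = true ↔ pvContig w c := by
  unfold pvCondB
  rw [index?_getD_eq_idxOf w c hc]
  simp only [PySem.List.count_eq]
  rw [PySem.List.slice_natCast_add, PySem.List.pyRepeat_singleton]
  simp [pvContig]

lemma isGroup_agree (w : String) :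
    pvIsGroupA w.toList PySem.Set.empty none = pvIsGroupB w.toList := by
  rw [Bool.eq_iff_iff, isGroupA_iff]
  have hA : (∀ c ∈ pvCollapse none w.toList, ¬ c ∈ PySem.Set.empty) := by
    intro c _ hc
    simp [PySem.Set.empty] at hc
  unfold pvIsGroupB
  rw [List.all_eq_true]
  constructor
  · rintro ⟨hnd, -⟩ c hcset
    have hcw : c ∈ w.toList := by rwa [PySem.Set.mem_ofList] at hcset
    exact (condB_iff w.toList c hcw).mpr
      (((contig_iff_collapse_nodup w.toList).mpr hnd) c hcw)
  · intro H
    refine ⟨(contig_iff_collapse_nodup w.toList).mp (fun d hd => ?_), hA⟩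
    exact (condB_iff w.toList d hd).mp
      (H d (by rwa [PySem.Set.mem_ofList]))

-- ===== VERDICT (by name: the statement is the Claim_ definition above) =====
theorem problem_1316_spec : Claim_equal_problem_1316 := by
  intro words _
  unfold Spec_problem_1316 problem_1316 problem_1316_alt
  have h : (fun (acc : Int) (w : String) => if pvIsGroupA w.toList PySem.Set.empty none then acc + 1 else acc)
      = (fun (acc : Int) (w : String) => if pvIsGroupB w.toList then acc + 1 else acc) := by
    funext acc w; rw [isGroup_agree]
  rw [h]
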